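-- pv_equiv track=rewrite | github.com/lisskor/advent-of-code-2024 | day7.py | try_equation
-- ===== SOURCE A (Python) =====
-- def try_equation(result: int, equation: list[int], concat: bool=False) -> bool:
--     level_lists = [[] for _ in range(len(equation))]
--     level = 0
--     level_lists[0].append(equation[0])
--     for next_num in equation[1:]:
--         level += 1
--         level_lists[level].extend([num + next_num for num in level_lists[level - 1]])
--         level_lists[level].extend([num * next_num for num in level_lists[level - 1]])
--         if concat:
--             level_lists[level].extend([int(str(num) + str(next_num)) for num in level_lists[level - 1]])
--     if result in level_lists[level]:
--         return True
--     else: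
--         return False
-- ===== SOURCE B (Python) =====
-- def try_equation(result: int, equation: list[int], concat: bool = False) -> bool:
--     # Depth-first recursion over the remaining numbers with short-circuit
--     # early exit, keeping a single accumulator instead of materialising
--     # every level's list of reachable values.
--     def search(acc, rest):
--         if not rest:
--             return acc == result
--         x = rest[0]
--         tail = rest[1:]
--         return (search(acc + x, tail)
--                 or search(acc * x, tail)
--                 or (concat and search(int(str(acc) + str(x)), tail)))
--     return search(equation[0], equation[1:])
-- ===== Notes on version B (the rewrite author's own statement) =====
-- stated objective: alternative
-- what changed: Replaces the breadth-first construction of a full per-level list of all reachable values (checked by membership at the end) with a depth-first recursion carrying a single accumulator and short-circuiting as soon as the result is reached, reducing memory from O(3^n) to O(n).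
import Mathlib
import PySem

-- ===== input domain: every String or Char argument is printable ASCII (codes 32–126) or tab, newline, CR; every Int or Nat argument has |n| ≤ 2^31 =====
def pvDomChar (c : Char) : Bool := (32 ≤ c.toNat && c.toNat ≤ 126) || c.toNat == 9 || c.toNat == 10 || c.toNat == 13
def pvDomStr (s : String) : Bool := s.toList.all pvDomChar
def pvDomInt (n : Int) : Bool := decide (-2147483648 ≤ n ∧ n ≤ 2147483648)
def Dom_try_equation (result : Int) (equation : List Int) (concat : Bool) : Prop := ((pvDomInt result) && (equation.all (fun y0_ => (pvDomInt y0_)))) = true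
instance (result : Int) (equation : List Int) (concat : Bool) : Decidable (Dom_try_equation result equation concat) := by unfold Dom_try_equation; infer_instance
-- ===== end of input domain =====

-- B replaces A's breadth-first per-level lists of all reachable values with a
-- depth-first recursion on a single accumulator that short-circuits on success
-- (a different traversal that stores only the current accumulator, not every level; measured speed is the same).


-- ===== PORT A =====
-- int(str(num) + str(next_num)); inside Pre_ (next_num ≥ 0) the parse always
-- succeeds, so the `.getD 0` default is never taken on admitted inputs.
def pyCat (a b : Int) : Int :=
  (PySem.Int.ofChars? (PySem.Int.toChars a ++ PySem.Int.toChars b)).getD 0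

-- one loop iteration: extend the new level by +, then *, then (if concat) ||
def levelStep (concat : Bool) (cur : List Int) (x : Int) : List Int :=
  (cur.map (fun n => n + x)) ++ (cur.map (fun n => n * x)) ++
    (if concat then cur.map (fun n => pyCat n x) else [])

def try_equation (result : Int) (equation : List Int) (concat : Bool) : Bool :=
  match equation with
  | [] => false   -- Python raises IndexError on equation[0]; excluded by Pre_
  | e0 :: rest =>
    -- level_lists: list of levels, most recent first; level_lists[0] = [equation[0]]
    let levels := rest.foldl (fun ls x => levelStep concat ls.headI x :: ls) [[e0]]
    decide (result ∈ levels.headI)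

-- ===== PORT B =====
def searchB (result : Int) (concat : Bool) : Int → List Int → Bool
  | acc, [] => acc == result
  | acc, x :: tail =>
      searchB result concat (acc + x) tail
      || searchB result concat (acc * x) tail
      || (concat && searchB result concat (pyCat acc x) tail)

def try_equation_alt (result : Int) (equation : List Int) (concat : Bool) : Bool :=
  match equation with
  | [] => false   -- Python raises IndexError on equation[0]; excluded by Pre_
  | e0 :: rest => searchB result concat e0 rest

-- ===== PRECONDITION & SPEC =====
-- Pre_ excludes exactly the inputs where A raises: the empty equation
-- (IndexError on equation[0]) and, with concat, a negative number after the
-- first (int(str(num) + str(next_num)) raises ValueError on e.g. '3-5').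
def Pre_try_equation (result : Int) (equation : List Int) (concat : Bool) : Prop :=
  equation ≠ [] ∧ (concat = true → ∀ x ∈ equation.tail, 0 ≤ x)
instance (result : Int) (equation : List Int) (concat : Bool) : Decidable (Pre_try_equation result equation concat) := by unfold Pre_try_equation; infer_instance

def pvWitness_try_equation : Int × List Int × Bool := (5, ([2, 3], false))

def Spec_try_equation (result : Int) (equation : List Int) (concat : Bool) (out : Bool) : Prop := out = try_equation_alt result equation concat
instance (result : Int) (equation : List Int) (concat : Bool) (out : Bool) : Decidable (Spec_try_equation result equation concat out) := by unfold Spec_try_equation; infer_instance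

-- ===== CLAIM (what is proved, stated in full; the proofs are below) =====
def Claim_equal_try_equation : Prop := ∀ (result : Int) (equation : List Int) (concat : Bool), Dom_try_equation result equation concat → Pre_try_equation result equation concat → Spec_try_equation result equation concat (try_equation result equation concat)

-- ===== LEMMAS AND PROOFS =====

-- the head of A's stack of levels is the plain fold of levelStep on the head
lemma levels_headI (concat : Bool) :
    ∀ (rest : List Int) (ls : List (List Int)),
      (rest.foldl (fun ls x => levelStep concat ls.headI x :: ls) ls).headI
        = rest.foldl (levelStep concat) ls.headI := by
  intro rest
  induction rest with
  | nil => intro ls; rfl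
  | cons x rest ih =>
      intro ls
      simpa using ih (levelStep concat ls.headI x :: ls)

-- membership in the final level = some start value of the current level succeeds in B's DFS
lemma mem_foldl_iff (result : Int) (concat : Bool) :
    ∀ (rest : List Int) (cur : List Int),
      (result ∈ rest.foldl (levelStep concat) cur)
        ↔ ∃ s ∈ cur, searchB result concat s rest = true := by
  intro rest
  induction rest with
  | nil =>
      intro cur
      simp [searchB]
  | cons x rest ih =>
      intro cur
      rw [List.foldl_cons, ih]
      cases hc : concat <;>
        · simp only [levelStep, hc, if_true, if_false, List.append_nil,
            List.mem_append, List.mem_map, searchB, Bool.or_eq_true,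
            Bool.and_eq_true, Bool.false_and, Bool.true_and, Bool.or_false]
          aesop

-- ===== VERDICT (by name: the statement is the Claim_ definition above) =====
theorem try_equation_spec : Claim_equal_try_equation := by
  intro result equation concat _ hpre
  cases equation with
  | nil => exact absurd rfl hpre.1
  | cons e0 rest =>
      unfold Spec_try_equation
      show decide (result ∈ (List.foldl (fun ls x => levelStep concat ls.headI x :: ls) [[e0]] rest).headI)
             = searchB result concat e0 rest
      rw [levels_headI]
      have h := mem_foldl_iff result concat rest ([[e0]] : List (List Int)).headI
      cases hb : searchB result concat e0 rest
      · simp only [decide_eq_false_iff_not]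
        intro hmem
        rcases h.mp hmem with ⟨s, hs, hsr⟩
        simp only [List.headI, List.mem_singleton] at hs
        subst hs
        simp [hb] at hsr
      · simp only [decide_eq_true_eq]
        exact h.mpr ⟨e0, by simp [List.headI], hb⟩
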